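-- pv_equiv track=rewrite | github.com/kafeg/vcpkg-cyclonedx | vcpkg-cyclonedx-cpe-purl.py | extract_wildcard_prefix
-- ===== SOURCE A (Python) =====
-- from typing import Dict, List, Optional, Tuple
--
-- def extract_wildcard_prefix(pattern: str) -> str:
--     if not pattern:
--         return ""
--     prefix_chars: List[str] = []
--     for ch in pattern:
--         if ch in "*?[":
--             break
--         prefix_chars.append(ch)
--     if not prefix_chars:
--         return ""
--     prefix = "".join(prefix_chars).rstrip("-_ .")
--     return prefix.lower()
-- ===== SOURCE B (Python) =====
-- import re
--
-- _PREFIX_RE = re.compile(r'[^*?\[]*')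
--
-- def extract_wildcard_prefix(pattern: str) -> str:
--     m = _PREFIX_RE.match(pattern)
--     return m.group(0).rstrip("-_ .").lower()
-- ===== Notes on version B (the rewrite author's own statement) =====
-- stated objective: faster
-- what changed: Replaces the explicit per-character loop with break, list accumulation, join and two early returns by a single precompiled regex match of the complement class [^*?\[]* followed by rstrip and lower; the prefix scan runs in the regex engine's C code instead of a Python-level loop.
import Mathlib
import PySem

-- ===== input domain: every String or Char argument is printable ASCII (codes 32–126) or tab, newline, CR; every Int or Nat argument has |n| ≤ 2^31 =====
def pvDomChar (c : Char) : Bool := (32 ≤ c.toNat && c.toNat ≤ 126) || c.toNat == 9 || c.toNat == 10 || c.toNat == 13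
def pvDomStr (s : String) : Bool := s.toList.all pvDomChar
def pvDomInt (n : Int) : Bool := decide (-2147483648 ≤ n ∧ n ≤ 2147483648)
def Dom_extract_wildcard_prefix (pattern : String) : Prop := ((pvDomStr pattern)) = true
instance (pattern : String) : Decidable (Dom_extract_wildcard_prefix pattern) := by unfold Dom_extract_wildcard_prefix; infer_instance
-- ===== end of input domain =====

-- B replaces A's explicit loop-with-break, list accumulation and emptiness checks by a
-- single regex match of the complement class (ported as takeWhile) + rstrip + lower (idiomatic).

-- ===== PORT A =====
-- s.rstrip("-_ .") : drop the listed chars from the right end (exact for any chars)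
def pvRstripTrim (cs : List Char) : List Char :=
  (cs.reverse.dropWhile (fun c => c = '-' ∨ c = '_' ∨ c = ' ' ∨ c = '.')).reverse

-- the for-loop of A: append each char to prefix_chars, break at the first of "*?["
def pvLoopA : List Char → List Char → List Char
  | [], acc => acc
  | c :: cs, acc =>
      if c = '*' ∨ c = '?' ∨ c = '[' then acc
      else pvLoopA cs (acc ++ [c])

def extract_wildcard_prefix (pattern : String) : String :=
  if pattern = "" then ""
  else
    let prefix_chars := pvLoopA pattern.toList []
    if prefix_chars = [] then ""
    else PySem.Str.lower (String.ofList (pvRstripTrim prefix_chars))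

-- ===== PORT B =====
-- re.match(r'[^*?\[]*', pattern).group(0) = longest prefix of chars outside "*?["
def extract_wildcard_prefix_alt (pattern : String) : String :=
  PySem.Str.lower (String.ofList (pvRstripTrim
    (pattern.toList.takeWhile (fun c => ¬ (c = '*' ∨ c = '?' ∨ c = '[')))))

-- ===== PRECONDITION & SPEC =====
def Spec_extract_wildcard_prefix (pattern : String) (out : String) : Prop := out = extract_wildcard_prefix_alt pattern
instance (pattern : String) (out : String) : Decidable (Spec_extract_wildcard_prefix pattern out) := by unfold Spec_extract_wildcard_prefix; infer_instance

-- ===== CLAIM (what is proved, stated in full; the proofs are below) =====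
def Claim_equal_extract_wildcard_prefix : Prop := ∀ (pattern : String), Dom_extract_wildcard_prefix pattern → Spec_extract_wildcard_prefix pattern (extract_wildcard_prefix pattern)

-- ===== LEMMAS AND PROOFS =====

-- A's accumulating loop computes acc ++ takeWhile (not-wildcard)
theorem pvLoopA_eq_takeWhile (cs acc : List Char) :
    pvLoopA cs acc = acc ++ cs.takeWhile (fun c => ¬ (c = '*' ∨ c = '?' ∨ c = '[')) := by
  induction cs generalizing acc with
  | nil => simp [pvLoopA]
  | cons c cs ih =>
      by_cases h : c = '*' ∨ c = '?' ∨ c = '['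
      · simp [pvLoopA, h, List.takeWhile_cons]; tauto
      · simp [pvLoopA, h, List.takeWhile_cons, ih]; tauto

theorem alt_empty : extract_wildcard_prefix_alt "" = "" := by decide

-- ===== VERDICT (by name: the statement is the Claim_ definition above) =====
theorem extract_wildcard_prefix_spec : Claim_equal_extract_wildcard_prefix := by
  intro pattern _
  unfold Spec_extract_wildcard_prefix extract_wildcard_prefix
  by_cases hemp : pattern = ""
  · simp [hemp, alt_empty]
  · simp only [hemp, if_false]
    rw [pvLoopA_eq_takeWhile]
    simp only [List.nil_append]
    by_cases hpref : pattern.toList.takeWhile (fun c => ¬ (c = '*' ∨ c = '?' ∨ c = '[')) = []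
    · simp only [hpref, if_true]
      unfold extract_wildcard_prefix_alt
      rw [hpref]
      decide
    · simp only [hpref, if_false]
      rfl
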